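-- pv_equiv track=rewrite | github.com/augho/SQL-to-text-bench | src/common/string_utils.py | char_classes_of
-- ===== SOURCE A (Python) =====
-- import string
--
-- def char_classes_of(s: str):
--     res = {
--         "has_upper": False,
--         "has_lower": False,
--         "has_digit": False,
--         "has_punct": False,
--         "has_space": False,
--     }
--
--     for char in s:
--         if char.isupper():
--             res["has_upper"] = True
--         if char.islower():
--             res["has_lower"] = True
--         if char.isdigit():
--             res["has_digit"] = True
--         if char.isspace():
--             res["has_space"] = True
--         if char in string.punctuation:
--             res["has_punct"] = True
--         # early exit if all found
--         if all(res.values()):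
--             break
--     return res
-- ===== SOURCE B (Python) =====
-- import string
--
--
-- def char_classes_of(s: str):
--     return {
--         "has_upper": any(c.isupper() for c in s),
--         "has_lower": any(c.islower() for c in s),
--         "has_digit": any(c.isdigit() for c in s),
--         "has_punct": any(c in string.punctuation for c in s),
--         "has_space": any(c.isspace() for c in s),
--     }
-- ===== Notes on version B (the rewrite author's own statement) =====
-- stated objective: idiomatic
-- what changed: Replaces the single flag-updating loop with early exit by a dict built from five independent short-circuiting any(...) scans, one per character class.
import Mathlib
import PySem

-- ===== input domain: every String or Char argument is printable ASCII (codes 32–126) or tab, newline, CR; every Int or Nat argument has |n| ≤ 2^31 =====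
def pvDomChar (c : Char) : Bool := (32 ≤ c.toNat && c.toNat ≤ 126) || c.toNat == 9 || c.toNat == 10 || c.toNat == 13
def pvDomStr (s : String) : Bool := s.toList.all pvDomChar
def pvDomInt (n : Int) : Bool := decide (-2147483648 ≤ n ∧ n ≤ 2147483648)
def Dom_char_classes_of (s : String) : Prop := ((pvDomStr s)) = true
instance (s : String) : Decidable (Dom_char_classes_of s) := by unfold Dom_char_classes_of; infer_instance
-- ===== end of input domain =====

-- ===== PORT A =====
-- B is five independent short-circuiting scans (one `any` per class) instead of A's single combined pass with early exit (objective: idiomatic).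
-- string.punctuation
def pvPunct : List Char := "!\"#$%&'()*+,-./:;<=>?@[\\]^_`{|}~".toList

-- A's loop: one pass updating five flags, breaking once all are set
def pvLoopA : List Char → Bool × Bool × Bool × Bool × Bool → Bool × Bool × Bool × Bool × Bool
  | [], st => st
  | c :: cs, (u, l, d, p, sp) =>
    let u' := u || PySem.Chars.isupper c
    let l' := l || PySem.Chars.islower c
    let d' := d || PySem.Chars.isdigit c
    let sp' := sp || PySem.Chars.isspace c
    let p' := p || pvPunct.contains c
    if u' && l' && d' && p' && sp' then (u', l', d', p', sp')
    else pvLoopA cs (u', l', d', p', sp')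

def char_classes_of (s : String) : List (String × Bool) :=
  let st := pvLoopA s.toList (false, false, false, false, false)
  [("has_upper", st.1), ("has_lower", st.2.1), ("has_digit", st.2.2.1),
   ("has_punct", st.2.2.2.1), ("has_space", st.2.2.2.2)]

-- ===== PORT B =====
def char_classes_of_alt (s : String) : List (String × Bool) :=
  let cs := s.toList
  [("has_upper", cs.any PySem.Chars.isupper),
   ("has_lower", cs.any PySem.Chars.islower),
   ("has_digit", cs.any PySem.Chars.isdigit),
   ("has_punct", cs.any (fun c => pvPunct.contains c)),
   ("has_space", cs.any PySem.Chars.isspace)]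

-- ===== PRECONDITION & SPEC =====
def Spec_char_classes_of (s : String) (out : List (String × Bool)) : Prop := out = char_classes_of_alt s
instance (s : String) (out : List (String × Bool)) : Decidable (Spec_char_classes_of s out) := by unfold Spec_char_classes_of; infer_instance

-- ===== CLAIM =====
def Claim_equal_char_classes_of : Prop := ∀ (s : String), Dom_char_classes_of s → Spec_char_classes_of s (char_classes_of s)

-- ===== LEMMAS AND PROOFS =====
theorem pvLoopA_eq (cs : List Char) (u l d p sp : Bool) :
    pvLoopA cs (u, l, d, p, sp) =
      (u || cs.any PySem.Chars.isupper, l || cs.any PySem.Chars.islower,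
       d || cs.any PySem.Chars.isdigit, p || cs.any (fun c => pvPunct.contains c),
       sp || cs.any PySem.Chars.isspace) := by
  induction cs generalizing u l d p sp with
  | nil => simp [pvLoopA]
  | cons c cs ih =>
    simp only [pvLoopA, List.any_cons]
    split
    · rename_i h
      simp only [Bool.and_eq_true] at h
      obtain ⟨⟨⟨⟨h1, h2⟩, h3⟩, h4⟩, h5⟩ := h
      simp only [← Bool.or_assoc, h1, h2, h3, h4, h5, Bool.true_or]
    · rw [ih]
      simp [Bool.or_assoc]

-- ===== VERDICT =====
theorem char_classes_of_spec : Claim_equal_char_classes_of := by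
  intro s _
  unfold Spec_char_classes_of char_classes_of char_classes_of_alt
  rw [pvLoopA_eq]
  simp
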